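-- pv_equiv track=rewrite | github.com/SlozilTomas/pg | cv4_levenstein.py | levensteinova_vzdalenost
-- ===== SOURCE A (Python) =====
-- def levensteinova_vzdalenost(dotaz1, dotaz2):
--     vzdalenost = 0
--     i = 0
--     length = max(len(dotaz1), len(dotaz2))
--     while i < length:
--         if i < len(dotaz1) and i < len(dotaz2):
--             if dotaz1[i] != dotaz2[i]:
--                 vzdalenost += 1
--         else:
--             vzdalenost += 1
--         i += 1
--     return vzdalenost
-- ===== SOURCE B (Python) =====
-- def levensteinova_vzdalenost(dotaz1, dotaz2):
--     # Divide & conquer: mismatches between equal-length strings are additive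
--     # under aligned splits, so recursively halve the common prefix; the part
--     # beyond the shorter string contributes its length.
--     def mism(a, b):
--         # a and b have equal length; count positions where they differ
--         if len(a) == 0:
--             return 0
--         if len(a) == 1:
--             return 1 if a != b else 0
--         k = len(a) // 2
--         return mism(a[:k], b[:k]) + mism(a[k:], b[k:])
--     n = min(len(dotaz1), len(dotaz2))
--     return mism(dotaz1[:n], dotaz2[:n]) + max(len(dotaz1), len(dotaz2)) - n
-- ===== Notes on version B (the rewrite author's own statement) =====
-- stated objective: alternative
-- what changed: Replaces A's single index-based while loop with a divide-and-conquer recursion that halves the common prefix (mismatch count is additive under aligned splits) plus a closed-form max-minus-min term for the tail.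
import Mathlib
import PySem

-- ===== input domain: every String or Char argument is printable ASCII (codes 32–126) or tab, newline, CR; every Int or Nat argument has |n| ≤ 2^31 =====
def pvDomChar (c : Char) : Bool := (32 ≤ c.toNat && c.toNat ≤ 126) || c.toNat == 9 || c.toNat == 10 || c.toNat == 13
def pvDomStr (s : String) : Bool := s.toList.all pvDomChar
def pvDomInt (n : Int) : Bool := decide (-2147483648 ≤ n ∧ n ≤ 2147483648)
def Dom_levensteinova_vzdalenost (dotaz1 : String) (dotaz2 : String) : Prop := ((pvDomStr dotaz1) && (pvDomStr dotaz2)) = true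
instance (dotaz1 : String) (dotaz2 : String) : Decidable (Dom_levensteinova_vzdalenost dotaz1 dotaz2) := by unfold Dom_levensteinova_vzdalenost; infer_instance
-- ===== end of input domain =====

-- B replaces A's single index-based while loop by a divide-and-conquer recursion
-- halving the common prefix, plus a closed-form max-minus-min tail term (objective: alternative).

-- ===== PORT A =====
-- while i < length: … i += 1  is the foldl over range(0, length)
def levensteinova_vzdalenost (dotaz1 : String) (dotaz2 : String) : Int :=
  let l1 := dotaz1.toList
  let l2 := dotaz2.toList
  let length : Int := max (l1.length : Int) (l2.length : Int)
  (PySem.List.pyRange 0 length 1).foldl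
    (fun vzdalenost i =>
      if i < (l1.length : Int) ∧ i < (l2.length : Int) then
        if PySem.List.pyGet? l1 i ≠ PySem.List.pyGet? l2 i then vzdalenost + 1 else vzdalenost
      else vzdalenost + 1) 0

-- ===== PORT B =====
-- helper mism(a, b): equal-length mismatch count by divide & conquer.
-- Python's slices a[:k] / a[k:] with 0 ≤ k ≤ len(a) are exactly List.take / List.drop.
def pvMism : List Char → List Char → Int
  | a, b =>
    if a.length = 0 then 0
    else if a.length = 1 then (if a ≠ b then 1 else 0)
    else
      pvMism (a.take (a.length / 2)) (b.take (a.length / 2)) +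
      pvMism (a.drop (a.length / 2)) (b.drop (a.length / 2))
termination_by a _ => a.length
decreasing_by
  · simp only [List.length_take]; omega
  · simp only [List.length_drop]; omega

def levensteinova_vzdalenost_alt (dotaz1 : String) (dotaz2 : String) : Int :=
  let l1 := dotaz1.toList
  let l2 := dotaz2.toList
  let n := min l1.length l2.length
  pvMism (l1.take n) (l2.take n) + ((max l1.length l2.length : Int) - (n : Int))

-- ===== PRECONDITION & SPEC =====
def Spec_levensteinova_vzdalenost (dotaz1 : String) (dotaz2 : String) (out : Int) : Prop := out = levensteinova_vzdalenost_alt dotaz1 dotaz2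
instance (dotaz1 : String) (dotaz2 : String) (out : Int) : Decidable (Spec_levensteinova_vzdalenost dotaz1 dotaz2 out) := by unfold Spec_levensteinova_vzdalenost; infer_instance

-- ===== CLAIM (what is proved, stated in full; the proofs are below) =====
def Claim_equal_levensteinova_vzdalenost : Prop := ∀ (dotaz1 : String) (dotaz2 : String), Dom_levensteinova_vzdalenost dotaz1 dotaz2 → Spec_levensteinova_vzdalenost dotaz1 dotaz2 (levensteinova_vzdalenost dotaz1 dotaz2)

-- ===== LEMMAS AND PROOFS =====

-- proof-side characterisation of the distance
def pvLev : List Char → List Char → Int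
  | [], ys => (ys.length : Int)
  | x :: xs, [] => ((x :: xs).length : Int)
  | x :: xs, y :: ys => (if x ≠ y then 1 else 0) + pvLev xs ys

theorem pvLev_nil_right (xs : List Char) : pvLev xs [] = (xs.length : Int) := by
  cases xs <;> simp [pvLev]

def pvZipSum (l1 l2 : List Char) : Int :=
  ((l1.zip l2).map (fun p => if p.1 ≠ p.2 then (1 : Int) else 0)).sum

theorem zipSum_eq_pvLev (l1 l2 : List Char) :
    pvZipSum l1 l2 + |(l1.length : Int) - (l2.length : Int)| = pvLev l1 l2 := by
  induction l1 generalizing l2 with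
  | nil => simp [pvLev, pvZipSum]
  | cons x xs ih =>
    cases l2 with
    | nil => simp [pvLev, pvZipSum]; positivity
    | cons y ys =>
      have := ih ys
      simp only [pvZipSum, List.zip_cons_cons, List.map_cons, List.sum_cons, pvLev,
        List.length_cons] at *
      push_cast at *
      have hd : ((xs.length : Int) + 1) - ((ys.length : Int) + 1)
          = (xs.length : Int) - (ys.length : Int) := by ring
      rw [hd]
      omega

-- pvMism computes the zip mismatch sum on equal-length lists
theorem pvMism_eq_zipSum (a b : List Char) (h : a.length = b.length) :
    pvMism a b = pvZipSum a b := by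
  rw [pvMism]
  by_cases h0 : a.length = 0
  · rw [if_pos h0]
    have : a = [] := List.eq_nil_of_length_eq_zero h0
    subst this
    simp [pvZipSum]
  · rw [if_neg h0]
    by_cases h1 : a.length = 1
    · rw [if_pos h1]
      obtain ⟨x, hx⟩ := List.length_eq_one_iff.mp h1
      obtain ⟨y, hy⟩ := List.length_eq_one_iff.mp (h ▸ h1)
      subst hx; subst hy
      simp [pvZipSum]
    · rw [if_neg h1]
      set k := a.length / 2 with hk
      have hka : k ≤ a.length := by omega
      have hkb : k ≤ b.length := by omega
      have hta : (a.take k).length = k := by simp [List.length_take]; omega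
      have htb : (b.take k).length = k := by simp [List.length_take]; omega
      have hda : (a.drop k).length = a.length - k := by simp
      have hdb : (b.drop k).length = b.length - k := by simp
      rw [pvMism_eq_zipSum (a.take k) (b.take k) (by omega),
          pvMism_eq_zipSum (a.drop k) (b.drop k) (by omega)]
      have hzip : a.zip b = (a.take k).zip (b.take k) ++ (a.drop k).zip (b.drop k) := by
        conv_lhs => rw [← List.take_append_drop k a, ← List.take_append_drop k b]
        exact List.zip_append (by omega)
      simp [pvZipSum, hzip]
termination_by a.length
decreasing_by
  · simp only [List.length_take]; omega
  · simp only [List.length_drop]; omega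

-- the zip sum only depends on the common prefix
theorem pvZipTake (n : Nat) (l1 l2 : List Char) :
    (l1.take n).zip (l2.take n) = (l1.zip l2).take n := by
  induction n generalizing l1 l2 with
  | zero => simp
  | succ m ih =>
    cases l1 with
    | nil => simp
    | cons x xs =>
      cases l2 with
      | nil => simp
      | cons y ys => simp [List.take_succ_cons, ih]

theorem zipSum_take_min (l1 l2 : List Char) :
    pvZipSum (l1.take (min l1.length l2.length)) (l2.take (min l1.length l2.length))
      = pvZipSum l1 l2 := by
  unfold pvZipSum
  rw [pvZipTake, List.take_of_length_le (by simp)]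

theorem loopA_eq_pvLev (l1 l2 : List Char) (k : Nat)
    (hk : k ≤ max l1.length l2.length) (acc : Int) :
    (PySem.List.pyRange (k : Int) (max (l1.length : Int) (l2.length : Int)) 1).foldl
      (fun vzdalenost i =>
        if i < (l1.length : Int) ∧ i < (l2.length : Int) then
          if PySem.List.pyGet? l1 i ≠ PySem.List.pyGet? l2 i then vzdalenost + 1 else vzdalenost
        else vzdalenost + 1) acc
      = acc + pvLev (l1.drop k) (l2.drop k) := by
  have hfuel : max l1.length l2.length - k < max l1.length l2.length - k + 1 := by omega
  by_cases hlt : k < max l1.length l2.length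
  · have hcons : PySem.List.pyRange (k : Int) (max (l1.length : Int) (l2.length : Int)) 1
        = (k : Int) :: PySem.List.pyRange ((k : Int) + 1) (max (l1.length : Int) (l2.length : Int)) 1 := by
      apply PySem.List.pyRange_one_cons
      omega
    rw [hcons]
    simp only [List.foldl_cons]
    have hsucc : ((k : Int) + 1) = ((k + 1 : Nat) : Int) := by push_cast; ring
    rw [hsucc]
    rw [loopA_eq_pvLev l1 l2 (k + 1) (by omega)]
    by_cases h1 : k < l1.length
    · by_cases h2 : k < l2.length
      · have hc : ((k : Int) < (l1.length : Int) ∧ (k : Int) < (l2.length : Int)) := by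
          constructor <;> exact_mod_cast ‹_›
        rw [if_pos hc]
        rw [PySem.List.pyGet?_natCast, PySem.List.pyGet?_natCast,
          List.getElem?_eq_getElem h1, List.getElem?_eq_getElem h2]
        have hd1 : l1.drop k = l1[k] :: l1.drop (k + 1) := List.drop_eq_getElem_cons h1
        have hd2 : l2.drop k = l2[k] :: l2.drop (k + 1) := List.drop_eq_getElem_cons h2
        rw [hd1, hd2]
        simp only [pvLev]
        by_cases hne : l1[k] = l2[k]
        · rw [if_neg (by simp [hne]), if_neg (by simp [hne])]; ring
        · rw [if_pos (by simp [hne]), if_pos (by simp [hne])]; ring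
      · have hc : ¬ ((k : Int) < (l1.length : Int) ∧ (k : Int) < (l2.length : Int)) := by
          push Not; intro _; exact_mod_cast Nat.le_of_not_lt h2
        rw [if_neg hc]
        have hd2 : l2.drop k = [] := List.drop_eq_nil_of_le (by omega)
        have hd2' : l2.drop (k + 1) = [] := List.drop_eq_nil_of_le (by omega)
        rw [hd2, hd2', pvLev_nil_right, pvLev_nil_right]
        simp only [List.length_drop]
        omega
    · have h2 : k < l2.length := by omega
      have hc : ¬ ((k : Int) < (l1.length : Int) ∧ (k : Int) < (l2.length : Int)) := by
        push Not; intro h; exact absurd (by exact_mod_cast h) h1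
      rw [if_neg hc]
      have hd1 : l1.drop k = [] := List.drop_eq_nil_of_le (by omega)
      have hd1' : l1.drop (k + 1) = [] := List.drop_eq_nil_of_le (by omega)
      rw [hd1, hd1']
      simp only [pvLev, List.length_drop]
      omega
  · have hnil : PySem.List.pyRange (k : Int) (max (l1.length : Int) (l2.length : Int)) 1 = [] := by
      apply PySem.List.pyRange_one_eq_nil
      omega
    have hk' : k = max l1.length l2.length := by omega
    have hd1 : l1.drop k = [] := List.drop_eq_nil_of_le (by omega)
    have hd2 : l2.drop k = [] := List.drop_eq_nil_of_le (by omega)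
    rw [hnil, hd1, hd2]
    simp [pvLev]
termination_by max l1.length l2.length - k

theorem alt_eq_pvLev (l1 l2 : List Char) :
    pvMism (l1.take (min l1.length l2.length)) (l2.take (min l1.length l2.length))
      + ((max l1.length l2.length : Int) - ((min l1.length l2.length : Nat) : Int))
      = pvLev l1 l2 := by
  rw [pvMism_eq_zipSum _ _ (by simp only [List.length_take]; omega), zipSum_take_min]
  rw [← zipSum_eq_pvLev]
  have : ((max l1.length l2.length : Nat) : Int) - ((min l1.length l2.length : Nat) : Int)
      = |(l1.length : Int) - (l2.length : Int)| := by
    rcases le_total l1.length l2.length with h | h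
    · rw [abs_of_nonpos (by push_cast; omega)]; omega
    · rw [abs_of_nonneg (by push_cast; omega)]; omega
  push_cast at this ⊢
  omega

-- ===== VERDICT (by name: the statement is the Claim_ definition above) =====
theorem levensteinova_vzdalenost_spec : Claim_equal_levensteinova_vzdalenost := by
  intro d1 d2 _
  unfold Spec_levensteinova_vzdalenost levensteinova_vzdalenost levensteinova_vzdalenost_alt
  have h := loopA_eq_pvLev d1.toList d2.toList 0 (by omega) 0
  simp only [Nat.cast_zero] at h
  rw [h, List.drop_zero, List.drop_zero, ← alt_eq_pvLev]
  ring
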